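-- pv_equiv track=rewrite | github.com/Stickerleee/cs61a-2020fa | cats/cats.py | shifty_shifts
-- ===== SOURCE A (Python) =====
-- def shifty_shifts(start, goal, limit):
--     """A diff function for autocorrect that determines how many letters
--     in START need to be substituted to create GOAL, then adds the difference in
--     their lengths.
--     从头开始比较两个字符串， 返回不相同的字符个数或字符数目之差；limit限制不相同的字符个数，当limit为0时结束迭代直接返回
--     """
--     # BEGIN PROBLEM 6
--     # 根据index迭代
--     # if (diff_len:=len(goal) - len(start)) > 0:
--     #     short, long = start, goal
--     # else:
--     #     long, short = start, goal
--     # diff = 0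
--     # for i in range(len(short)):
--     #     diff += 0 if short[i] == long[i] else 1
--     # return diff + abs(diff_len)
--
--     # 递归
--     # 相等快速通道
--     if start == goal:
--         return 0
--     elif limit<1 or not start or not goal:
--         # 结束迭代条件，字符串为空或limit为0
--         return max(len(goal), len(start))
--     else:
--         diff = 0
--         if start[0] != goal[0]:
--             # 比较首字符，若不同则limit-1并记录
--             limit -= 1
--             diff = 1
--         return diff + shifty_shifts(start[1:],goal[1:],limit)
-- ===== SOURCE B (Python) =====
-- def shifty_shifts(start, goal, limit):
--     """Single index-based pass: count substitutions over the common prefix,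
--     charging the rest of the longer string once the budget runs out; only a
--     cost-free finish (identical remainders) avoids that charge, so the
--     remainder comparison is performed at most once per call."""
--     if start == goal:
--         return 0
--     ls, lg = len(start), len(goal)
--     diff = 0
--     for i in range(min(ls, lg)):
--         if limit < 1:
--             return diff if start[i:] == goal[i:] else diff + max(ls, lg) - i
--         if start[i] != goal[i]:
--             limit -= 1
--             diff += 1
--     return diff + max(ls, lg) - min(ls, lg)
-- ===== Notes on version B (the rewrite author's own statement) =====
-- stated objective: faster
-- what changed: Replaced the recursion that builds two slices and re-tests whole-suffix equality at every step (O(n^2)) by a single index-based loop that counts substitutions and compares the remaining suffixes at most once, when the budget is exhausted.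
import Mathlib
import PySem

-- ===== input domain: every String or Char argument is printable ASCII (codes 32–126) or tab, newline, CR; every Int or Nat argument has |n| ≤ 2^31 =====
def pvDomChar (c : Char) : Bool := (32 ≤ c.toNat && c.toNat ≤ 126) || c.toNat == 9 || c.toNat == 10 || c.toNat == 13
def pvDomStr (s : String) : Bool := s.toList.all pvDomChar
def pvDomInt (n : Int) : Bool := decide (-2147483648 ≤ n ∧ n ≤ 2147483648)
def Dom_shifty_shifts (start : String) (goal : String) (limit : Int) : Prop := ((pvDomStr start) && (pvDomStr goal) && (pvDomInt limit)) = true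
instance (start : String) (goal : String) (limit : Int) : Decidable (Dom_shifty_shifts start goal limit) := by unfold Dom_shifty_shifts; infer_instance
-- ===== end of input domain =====

-- B replaces A's recursion (which slices and re-tests whole-suffix equality at every step, O(n^2))
-- by a single index-based loop that compares the remaining suffixes at most once (objective: faster).

-- ===== PORT A =====
-- literal transliteration of A's recursion over the characters (strings as List Char)
def shiftyGo (s : List Char) (g : List Char) (limit : Int) : Int :=
  if s = g then 0
  else if limit < 1 ∨ s = [] ∨ g = [] then ((max g.length s.length : Nat) : Int)
  else
    match s, g with
    | a :: s', b :: g' =>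
        (if a ≠ b then (1 : Int) else 0) + shiftyGo s' g' (if a ≠ b then limit - 1 else limit)
    | _, _ => 0   -- unreachable: both lists nonempty here
termination_by s.length
decreasing_by simp_all

def shifty_shifts (start : String) (goal : String) (limit : Int) : Int :=
  shiftyGo start.toList goal.toList limit

-- ===== PORT B =====
-- the for-loop of Source B, i running over range(min ls lg); early returns become branches
def altGo (s g : List Char) (ls lg : Nat) (limit diff : Int) (i : Nat) : Int :=
  if i ≥ min ls lg then diff + ((max ls lg : Nat) : Int) - ((min ls lg : Nat) : Int)
  else if limit < 1 then
    (if s.drop i = g.drop i then diff else diff + ((max ls lg : Nat) : Int) - (i : Int))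
  else if s[i]? ≠ g[i]? then altGo s g ls lg (limit - 1) (diff + 1) (i + 1)
  else altGo s g ls lg limit diff (i + 1)
termination_by min ls lg - i
decreasing_by all_goals omega

def shifty_shifts_alt (start : String) (goal : String) (limit : Int) : Int :=
  if start.toList = goal.toList then 0
  else altGo start.toList goal.toList start.toList.length goal.toList.length limit 0 0

-- ===== PRECONDITION & SPEC =====
def Spec_shifty_shifts (start : String) (goal : String) (limit : Int) (out : Int) : Prop := out = shifty_shifts_alt start goal limit
instance (start : String) (goal : String) (limit : Int) (out : Int) : Decidable (Spec_shifty_shifts start goal limit out) := by unfold Spec_shifty_shifts; infer_instance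

-- ===== CLAIM (what is proved, stated in full; the proofs are below) =====
def Claim_equal_shifty_shifts : Prop := ∀ (start : String) (goal : String) (limit : Int), Dom_shifty_shifts start goal limit → Spec_shifty_shifts start goal limit (shifty_shifts start goal limit)

-- ===== LEMMAS AND PROOFS =====

lemma drop_ne_of_len_ne (s g : List Char) (h : s.length ≠ g.length)
    (i : Nat) (hi : i ≤ min s.length g.length) :
    s.drop i ≠ g.drop i := by
  intro hd
  have := congrArg List.length hd
  simp [List.length_drop] at this
  omega

-- exit value: remaining-suffix max length as an Int
lemma exit_val (s g : List Char) (i : Nat) (h1 : i ≤ s.length) (h2 : i ≤ g.length) :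
    ((max (g.drop i).length (s.drop i).length : Nat) : Int)
      = ((max s.length g.length : Nat) : Int) - (i : Int) := by
  have : max (g.drop i).length (s.drop i).length = max s.length g.length - i := by
    simp [List.length_drop]; omega
  rw [this]
  have : i ≤ max s.length g.length := le_trans h1 (le_max_left _ _)
  push_cast [Nat.cast_sub this]
  ring

-- loop invariant: B's loop from index i computes A's value on the i-th suffixes
lemma altGo_eq_shiftyGo (s g : List Char) :
    ∀ m i, i ≤ min s.length g.length → min s.length g.length - i = m →
      ∀ limit diff,
        altGo s g s.length g.length limit diff i
          = diff + shiftyGo (s.drop i) (g.drop i) limit := by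
  intro m
  induction m with
  | zero =>
    intro i hi hm limit diff
    have hik : i = min s.length g.length := by omega
    rw [altGo, if_pos (by omega)]
    by_cases hlen : s.length = g.length
    · have hdeq : s.drop i = g.drop i := by
        rw [List.drop_eq_nil_of_le (by omega), List.drop_eq_nil_of_le (by omega)]
      rw [shiftyGo.eq_def, if_pos hdeq]
      have : min s.length g.length = max s.length g.length := by omega
      rw [this]; ring
    · have hdne : s.drop i ≠ g.drop i := drop_ne_of_len_ne s g hlen i (by omega)
      have hemp : s.drop i = [] ∨ g.drop i = [] := by
        rcases (by omega : s.length ≤ i ∨ g.length ≤ i) with h | h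
        · exact Or.inl (List.drop_eq_nil_of_le h)
        · exact Or.inr (List.drop_eq_nil_of_le h)
      rw [shiftyGo.eq_def, if_neg hdne, if_pos (Or.inr hemp),
          exit_val s g i (by omega) (by omega), hik]
      ring
  | succ m ih =>
    intro i hi hm limit diff
    have hisl : i < s.length := by omega
    have higl : i < g.length := by omega
    rw [altGo, if_neg (by omega)]
    by_cases hlim : limit < 1
    · rw [if_pos hlim]
      by_cases hdeq : s.drop i = g.drop i
      · rw [if_pos hdeq, shiftyGo.eq_def, if_pos hdeq]; ring
      · rw [if_neg hdeq, shiftyGo.eq_def, if_neg hdeq, if_pos (Or.inl hlim),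
            exit_val s g i (by omega) (by omega)]
        ring
    · rw [if_neg hlim]
      have hds : s.drop i = s[i] :: s.drop (i + 1) := List.drop_eq_getElem_cons hisl
      have hdg : g.drop i = g[i] :: g.drop (i + 1) := List.drop_eq_getElem_cons higl
      have hget : (s[i]? ≠ g[i]?) ↔ (s[i] ≠ g[i]) := by simp [hisl, higl]
      by_cases hdeq : s.drop i = g.drop i
      · -- suffixes already equal: the characters agree and the tails stay equal
        have hch : s[i] = g[i] := by
          have := hdeq; rw [hds, hdg] at this; exact (List.cons.injEq _ _ _ _ ▸ this).1
        have htl : s.drop (i + 1) = g.drop (i + 1) := by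
          have := hdeq; rw [hds, hdg] at this; exact (List.cons.injEq _ _ _ _ ▸ this).2
        have h1 : shiftyGo (s.drop i) (g.drop i) limit = 0 := by
          rw [shiftyGo.eq_def, if_pos hdeq]
        have h2 : shiftyGo (s.drop (i + 1)) (g.drop (i + 1)) limit = 0 := by
          rw [shiftyGo.eq_def, if_pos htl]
        rw [if_neg (by simp [hget, hch]), ih (i + 1) (by omega) (by omega), h1, h2]
      · rw [shiftyGo.eq_def, if_neg hdeq]
        rw [if_neg (show ¬(limit < 1 ∨ s.drop i = [] ∨ g.drop i = []) from by
          rintro (h | h | h)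
          · omega
          · rw [hds] at h; exact List.cons_ne_nil _ _ h
          · rw [hdg] at h; exact List.cons_ne_nil _ _ h)]
        conv_rhs => rw [hds, hdg]
        by_cases hc : s[i] = g[i]
        · rw [if_neg (by simp [hget, hc]), ih (i + 1) (by omega) (by omega)]
          simp [hc]
        · rw [if_pos (by simp [hget, hc]), ih (i + 1) (by omega) (by omega)]
          simp [hc]; ring

-- ===== VERDICT (by name: the statement is the Claim_ definition above) =====
theorem shifty_shifts_spec : Claim_equal_shifty_shifts := by
  intro start goal limit _
  unfold Spec_shifty_shifts shifty_shifts shifty_shifts_alt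
  by_cases heq : start.toList = goal.toList
  · rw [if_pos heq, shiftyGo.eq_def, if_pos heq]
  · rw [if_neg heq,
        altGo_eq_shiftyGo start.toList goal.toList
          (min start.toList.length goal.toList.length) 0 (by omega) (by omega) limit 0]
    simp
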